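-- pv_equiv track=rewrite | github.com/kabirahuja2431/transformers-hg | create_data_for_spcfg_induction.py | generate_order_rule_generalization_output
-- ===== SOURCE A (Python) =====
-- def generate_order_rule_generalization_output(input_sent):
--     auxs = ["do", "does", "doesn't", "don't"]
--     input_tokens = input_sent.split()
--
--     # According to the order rule, the auxiliary verb should be the first token in the output.
--     # So, we will first find the auxiliary verb in the input sentence and then move it to the first position.
--     # If there is no auxiliary verb in the input sentence, we will throw an error.
--
--     output_tokens = ["" for _ in range(len(input_tokens))]
--     first_aux, first_aux_idx = None, None
--     for idx, token in enumerate(input_tokens):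
--         if token in auxs:
--             first_aux = token
--             first_aux_idx = idx
--             break
--     if first_aux is None:
--         raise ValueError("No auxiliary verb found in the input sentence.")
--
--     for idx in range(len(input_tokens)):
--         if idx == 0:
--             output_tokens[idx] = first_aux
--         elif idx <= first_aux_idx:
--             output_tokens[idx] = input_tokens[idx - 1]
--         else:
--             output_tokens[idx] = input_tokens[idx]
--
--     return " ".join(output_tokens).replace(".", "?")
-- ===== SOURCE B (Python) =====
-- def generate_order_rule_generalization_output(input_sent):
--     auxs = ["do", "does", "doesn't", "don't"]
--     prefix = []
--     rest = input_sent.split()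
--     while rest:
--         t = rest[0]
--         rest = rest[1:]
--         if t in auxs:
--             return " ".join([t] + prefix + rest).replace(".", "?")
--         prefix.append(t)
--     raise ValueError("No auxiliary verb found in the input sentence.")
-- ===== Notes on version B (the rewrite author's own statement) =====
-- stated objective: simpler
-- what changed: B does one structural scan that returns [aux]+prefix+rest directly at the first auxiliary, dropping A's separate zero-initialised output array and second index-arithmetic build loop.
import Mathlib
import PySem

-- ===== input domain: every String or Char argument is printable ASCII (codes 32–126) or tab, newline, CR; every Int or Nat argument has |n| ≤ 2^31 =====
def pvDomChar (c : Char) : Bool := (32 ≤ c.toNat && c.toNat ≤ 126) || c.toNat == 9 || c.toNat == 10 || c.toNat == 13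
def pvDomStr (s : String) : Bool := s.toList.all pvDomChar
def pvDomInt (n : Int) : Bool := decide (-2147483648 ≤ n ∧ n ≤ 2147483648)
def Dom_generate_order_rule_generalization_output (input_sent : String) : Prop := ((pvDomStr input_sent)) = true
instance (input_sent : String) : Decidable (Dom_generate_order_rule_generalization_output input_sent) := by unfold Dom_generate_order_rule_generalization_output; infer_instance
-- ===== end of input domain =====

-- B replaces A's zero-initialised output array and second index-arithmetic build loop by a
-- single structural scan that returns [aux] + prefix + rest at the first auxiliary (simpler).

-- ===== PORT A =====
def pvAuxs : List String := ["do", "does", "doesn't", "don't"]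

-- A's first loop: enumerate with break at the first auxiliary
def pvFindAuxA : List String → Nat → Option (String × Nat)
  | [], _ => none
  | t :: ts, idx => if t ∈ pvAuxs then some (t, idx) else pvFindAuxA ts (idx + 1)

def generate_order_rule_generalization_output (input_sent : String) : String :=
  let input_tokens := PySem.Str.split₀ input_sent
  match pvFindAuxA input_tokens 0 with
  | none => ""   -- Python raises ValueError here; excluded by Pre_
  | some (first_aux, first_aux_idx) =>
    -- A's second loop: fill output_tokens[idx] by index arithmetic (indices are in range, so getD is exact)
    let output_tokens := (List.range input_tokens.length).map (fun idx =>
      if idx = 0 then first_aux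
      else if idx ≤ first_aux_idx then input_tokens.getD (idx - 1) ""
      else input_tokens.getD idx "")
    PySem.Str.replace (PySem.Str.join " " output_tokens) "." "?"

-- ===== PORT B =====
-- B's single scan: prefix of seen tokens, return at the first auxiliary
def pvGoB : List String → List String → Option (List String)
  | _, [] => none
  | pre, t :: rest => if t ∈ pvAuxs then some (t :: (pre ++ rest)) else pvGoB (pre ++ [t]) rest

def generate_order_rule_generalization_output_alt (input_sent : String) : String :=
  match pvGoB [] (PySem.Str.split₀ input_sent) with
  | none => ""   -- Python raises ValueError here; excluded by Pre_
  | some out => PySem.Str.replace (PySem.Str.join " " out) "." "?"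

-- ===== PRECONDITION & SPEC =====
-- A raises ValueError when no auxiliary verb occurs among the whitespace-split tokens; Pre_ excludes exactly those inputs.
def Pre_generate_order_rule_generalization_output (input_sent : String) : Prop :=
  ∃ t ∈ PySem.Str.split₀ input_sent, t ∈ pvAuxs
instance (input_sent : String) : Decidable (Pre_generate_order_rule_generalization_output input_sent) := by unfold Pre_generate_order_rule_generalization_output; infer_instance
def pvWitness_generate_order_rule_generalization_output : String := "does the cat like fish ."

def Spec_generate_order_rule_generalization_output (input_sent : String) (out : String) : Prop := out = generate_order_rule_generalization_output_alt input_sent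
instance (input_sent : String) (out : String) : Decidable (Spec_generate_order_rule_generalization_output input_sent out) := by unfold Spec_generate_order_rule_generalization_output; infer_instance

-- ===== CLAIM (what is proved, stated in full; the proofs are below) =====
def Claim_equal_generate_order_rule_generalization_output : Prop := ∀ (input_sent : String), Dom_generate_order_rule_generalization_output input_sent → Pre_generate_order_rule_generalization_output input_sent → Spec_generate_order_rule_generalization_output input_sent (generate_order_rule_generalization_output input_sent)

-- ===== LEMMAS AND PROOFS =====

lemma pvFindAuxA_shift (ts : List String) (idx : Nat) :
    pvFindAuxA ts (idx + 1) = (pvFindAuxA ts idx).map (fun p => (p.1, p.2 + 1)) := by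
  induction ts generalizing idx with
  | nil => rfl
  | cons t ts ih =>
    simp only [pvFindAuxA]
    split_ifs with h
    · rfl
    · exact ih (idx + 1)

lemma pvFindAuxA_lt (ts : List String) (idx a i : _) (h : pvFindAuxA ts idx = some (a, i)) :
    i - idx < ts.length ∧ idx ≤ i := by
  induction ts generalizing idx with
  | nil => simp [pvFindAuxA] at h
  | cons t ts ih =>
    simp only [pvFindAuxA] at h
    split_ifs at h with ht
    · cases h; constructor <;> simp
    · have := ih (idx + 1) h
      refine ⟨?_, by omega⟩
      simp only [List.length_cons]
      omega

lemma pvGoB_eq (rest pre : List String) :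
    pvGoB pre rest = (pvFindAuxA rest 0).map
      (fun p => p.1 :: (pre ++ rest.take p.2 ++ rest.drop (p.2 + 1))) := by
  induction rest generalizing pre with
  | nil => rfl
  | cons t rest ih =>
    simp only [pvGoB, pvFindAuxA]
    split_ifs with h
    · simp
    · rw [ih, pvFindAuxA_shift]
      cases pvFindAuxA rest 0 with
      | none => rfl
      | some p => simp [List.take_succ_cons, List.drop_succ_cons]

lemma pvBuild_eq (tokens : List String) (a : String) (i : Nat) (hi : i < tokens.length) :
    (List.range tokens.length).map (fun idx =>
      if idx = 0 then a
      else if idx ≤ i then tokens.getD (idx - 1) ""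
      else tokens.getD idx "")
    = a :: (tokens.take i ++ tokens.drop (i + 1)) := by
  apply List.ext_getElem
  · simp; omega
  · intro j hj hj'
    simp only [List.getElem_map, List.getElem_range]
    obtain _ | k := j
    · simp
    · have hjlen : k + 1 < tokens.length := by simpa using hj
      rw [List.getElem_cons_succ]
      by_cases hji : k + 1 ≤ i
      · rw [List.getElem_append_left (by simp; omega)]
        simp only [if_neg (by omega : ¬ k + 1 = 0), if_pos hji, List.getElem_take,
          Nat.add_sub_cancel]
        exact List.getD_eq_getElem _ _ (by omega)
      · rw [List.getElem_append_right (by simp; omega)]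
        simp only [if_neg (by omega : ¬ k + 1 = 0), if_neg hji, List.getElem_drop,
          Nat.add_sub_cancel]
        have heq : i + 1 + (k - (tokens.take i).length) = k + 1 := by simp; omega
        simp only [heq]
        exact List.getD_eq_getElem _ _ hjlen

-- ===== VERDICT (by name: the statement is the Claim_ definition above) =====
theorem generate_order_rule_generalization_output_spec : Claim_equal_generate_order_rule_generalization_output := by
  intro s _ _
  unfold Spec_generate_order_rule_generalization_output
  unfold generate_order_rule_generalization_output generate_order_rule_generalization_output_alt
  cases h : pvFindAuxA (PySem.Str.split₀ s) 0 with
  | none => rw [pvGoB_eq]; simp [h]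
  | some p =>
    obtain ⟨a, i⟩ := p
    have hi : i < (PySem.Str.split₀ s).length := by
      have := (pvFindAuxA_lt _ 0 a i h).1; omega
    rw [pvGoB_eq]
    simp only [h, Option.map_some, List.nil_append]
    rw [pvBuild_eq _ a i hi]
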